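-- pv_equiv track=rewrite | github.com/Edwing08/CS50AI | crossword/generate.py | obtain_list_min
-- ===== SOURCE A (Python) =====
-- def obtain_list_min(array, mini):
--     """
--     Obtain the minimum or maximum values from a list
--     """
--     list_len = len(array)
--
--     if list_len > 1:
--
--         if mini:
--             min_or_max_number = min(array, key = lambda tuple: tuple[1])[1]
--         else:
--             min_or_max_number = max(array, key = lambda tuple: tuple[1])[1]
--
--         result = []
--
--         for number in array:
--             if number[1] == min_or_max_number:
--                 result.append(number)
--
--     return result
-- ===== SOURCE B (Python) =====
-- def obtain_list_min(array, mini):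
--     # One-pass running-extremum scan instead of A's extremum-then-filter two passes.
--     best = None
--     result = []
--     for t in array:
--         if best is None or (t[1] < best if mini else t[1] > best):
--             best = t[1]
--             result = [t]
--         elif t[1] == best:
--             result.append(t)
--     return result
-- ===== Notes on version B (the rewrite author's own statement) =====
-- stated objective: alternative
-- what changed: Replaced A's two-pass scan (min/max with a key, then a filtering loop) by a single pass that maintains the running extremum and resets/extends the result list as it goes.
import Mathlib
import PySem

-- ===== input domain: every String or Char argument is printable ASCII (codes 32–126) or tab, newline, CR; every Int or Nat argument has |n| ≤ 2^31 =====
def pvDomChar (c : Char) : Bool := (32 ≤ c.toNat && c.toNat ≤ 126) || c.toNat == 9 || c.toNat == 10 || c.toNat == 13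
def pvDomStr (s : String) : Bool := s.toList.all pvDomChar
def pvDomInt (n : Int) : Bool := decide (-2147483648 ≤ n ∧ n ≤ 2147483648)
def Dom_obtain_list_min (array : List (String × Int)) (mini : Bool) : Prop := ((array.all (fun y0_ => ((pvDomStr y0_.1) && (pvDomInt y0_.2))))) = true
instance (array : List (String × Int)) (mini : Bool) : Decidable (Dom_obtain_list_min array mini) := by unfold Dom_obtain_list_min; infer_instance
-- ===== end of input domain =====

-- B replaces A's two-pass extremum-then-filter by a single running-extremum pass; equivalence of return values on lists of length > 1.

-- ===== PORT A =====
-- A: find min/max of second components, then filter matching tuples.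
def obtain_list_min (array : List (String × Int)) (mini : Bool) : List (String × Int) :=
  if array.length > 1 then
    match (if mini then PySem.List.min? array (fun t => t.2)
           else PySem.List.max? array (fun t => t.2)) with
    | some m =>
        array.foldl (fun result number =>
          if number.2 == m.2 then result ++ [number] else result) []
    | none => []   -- unreachable under the length guard; Python A never reaches min/max on []
  else []          -- Python A raises UnboundLocalError here (excluded by Pre_)

-- ===== PORT B =====
def pvStepB (mini : Bool) (st : Option Int × List (String × Int)) (t : String × Int) :
    Option Int × List (String × Int) :=
  match st.1 with
  | none => (some t.2, [t])
  | some b =>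
      if (if mini then t.2 < b else b < t.2) then (some t.2, [t])
      else if t.2 == b then (st.1, st.2 ++ [t])
      else st

def obtain_list_min_alt (array : List (String × Int)) (mini : Bool) : List (String × Int) :=
  (array.foldl (pvStepB mini) (none, [])).2

-- ===== PRECONDITION & SPEC =====
-- Pre_ excludes exactly the inputs (length ≤ 1) on which Python A raises UnboundLocalError.
def Pre_obtain_list_min (array : List (String × Int)) (mini : Bool) : Prop :=
  array.length > 1
instance (array : List (String × Int)) (mini : Bool) : Decidable (Pre_obtain_list_min array mini) := by unfold Pre_obtain_list_min; infer_instance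
def pvWitness_obtain_list_min : (List (String × Int)) × Bool := ([("a", 1), ("b", 2)], true)

def Spec_obtain_list_min (array : List (String × Int)) (mini : Bool) (out : List (String × Int)) : Prop := out = obtain_list_min_alt array mini
instance (array : List (String × Int)) (mini : Bool) (out : List (String × Int)) : Decidable (Spec_obtain_list_min array mini out) := by unfold Spec_obtain_list_min; infer_instance

-- ===== CLAIM (what is proved, stated in full; the proofs are below) =====
def Claim_equal_obtain_list_min : Prop := ∀ (array : List (String × Int)) (mini : Bool), Dom_obtain_list_min array mini → Pre_obtain_list_min array mini → Spec_obtain_list_min array mini (obtain_list_min array mini)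

-- ===== LEMMAS AND PROOFS =====

-- running extremum of the second components, seeded with b
def pvExtv (mini : Bool) (b : Int) (xs : List (String × Int)) : Int :=
  xs.foldl (fun v t => if mini then min v t.2 else max v t.2) b

theorem pvExtv_le (mini : Bool) (b : Int) (xs : List (String × Int)) :
    (if mini then pvExtv mini b xs ≤ b else b ≤ pvExtv mini b xs) ∧
    ∀ t ∈ xs, (if mini then pvExtv mini b xs ≤ t.2 else t.2 ≤ pvExtv mini b xs) := by
  induction xs generalizing b with
  | nil => cases mini <;> simp [pvExtv]
  | cons x t ih =>
    cases mini <;> simp only [pvExtv, List.foldl_cons, if_true, if_false, Bool.false_eq_true] at *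
    · refine ⟨le_trans (le_max_left b x.2) (ih (max b x.2)).1, ?_⟩
      intro u hu
      rcases List.mem_cons.mp hu with h | h
      · subst h; exact le_trans (le_max_right b u.2) (ih (max b u.2)).1
      · exact (ih _).2 u h
    · refine ⟨le_trans (ih (min b x.2)).1 (min_le_left b x.2), ?_⟩
      intro u hu
      rcases List.mem_cons.mp hu with h | h
      · subst h; exact le_trans (ih (min b u.2)).1 (min_le_right b u.2)
      · exact (ih _).2 u h

theorem pvExtv_mem (mini : Bool) (b : Int) (xs : List (String × Int)) :
    pvExtv mini b xs = b ∨ ∃ u ∈ xs, u.2 = pvExtv mini b xs := by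
  induction xs generalizing b with
  | nil => left; rfl
  | cons x t ih =>
    have h := ih (if mini then min b x.2 else max b x.2)
    have e : pvExtv mini b (x :: t) = pvExtv mini (if mini then min b x.2 else max b x.2) t := by
      cases mini <;> simp [pvExtv]
    rcases h with h | ⟨u, hu, he⟩
    · rw [e, h]
      cases mini <;> simp only [if_true, if_false, Bool.false_eq_true]
      · rcases max_choice b x.2 with hc | hc
        · exact Or.inl hc
        · exact Or.inr ⟨x, by simp, hc.symm⟩
      · rcases min_choice b x.2 with hc | hc
        · exact Or.inl hc
        · exact Or.inr ⟨x, by simp, hc.symm⟩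
    · exact Or.inr ⟨u, by simp [hu], e ▸ he⟩

-- loop invariant of B's fold: with b the extremum of a virtual processed prefix P and
-- acc its matching elements, folding xs yields the extremum of P ++ xs and its matches.
theorem pvStepB_inv (mini : Bool) (xs : List (String × Int)) :
    ∀ (b : Int) (acc P : List (String × Int)),
      acc = P.filter (fun t => t.2 == b) →
      (∀ t ∈ P, if mini then b ≤ t.2 else t.2 ≤ b) →
      xs.foldl (pvStepB mini) (some b, acc)
        = (some (pvExtv mini b xs),
           (P ++ xs).filter (fun t => t.2 == pvExtv mini b xs)) := by
  induction xs with
  | nil =>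
    intro b acc P hacc _
    simp [pvExtv, hacc]
  | cons x t ih =>
    intro b acc P hacc hP
    have hext : pvExtv mini b (x :: t) = pvExtv mini (if mini then min b x.2 else max b x.2) t := by
      cases mini <;> simp [pvExtv]
    by_cases himp : (if mini then x.2 < b else b < x.2)
    · -- strict improvement: reset result to [x]
      have hstep : pvStepB mini (some b, acc) x = (some x.2, [x]) := by
        simp [pvStepB, himp]
      have hb' : (if mini then min b x.2 else max b x.2) = x.2 := by
        cases mini <;> simp_all <;> omega
      have hP' : ∀ u ∈ P ++ [x], if mini then x.2 ≤ u.2 else u.2 ≤ x.2 := by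
        intro u hu
        rcases List.mem_append.mp hu with h | h
        · have := hP u h; cases mini <;> simp_all <;> omega
        · simp at h; subst h; cases mini <;> simp
      have hacc' : [x] = (P ++ [x]).filter (fun u => u.2 == x.2) := by
        have : P.filter (fun u => u.2 == x.2) = [] := by
          apply List.filter_eq_nil_iff.mpr
          intro u hu
          have := hP u hu
          cases mini <;> simp_all <;> omega
        simp [List.filter_append, this]
      have := ih x.2 [x] (P ++ [x]) hacc' hP'
      rw [List.foldl_cons, hstep, this, hext, hb']
      simp
    · by_cases heq : x.2 = b
      · -- tie: append x
        have hstep : pvStepB mini (some b, acc) x = (some b, acc ++ [x]) := by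
          simp [pvStepB, heq]
        have hb' : (if mini then min b x.2 else max b x.2) = b := by
          cases mini <;> simp [heq]
        have hP' : ∀ u ∈ P ++ [x], if mini then b ≤ u.2 else u.2 ≤ b := by
          intro u hu
          rcases List.mem_append.mp hu with h | h
          · exact hP u h
          · simp at h; subst h; cases mini <;> simp [heq]
        have hacc' : acc ++ [x] = (P ++ [x]).filter (fun u => u.2 == b) := by
          simp [List.filter_append, heq, hacc]
        have := ih b (acc ++ [x]) (P ++ [x]) hacc' hP'
        rw [List.foldl_cons, hstep, this, hext, hb']
        simp
      · -- worse: state unchanged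
        have hstep : pvStepB mini (some b, acc) x = (some b, acc) := by
          simp [pvStepB, himp, heq]
        have hb' : (if mini then min b x.2 else max b x.2) = b := by
          cases mini <;> simp_all
        have hP' : ∀ u ∈ P ++ [x], if mini then b ≤ u.2 else u.2 ≤ b := by
          intro u hu
          rcases List.mem_append.mp hu with h | h
          · exact hP u h
          · simp at h; subst h; cases mini <;> simp_all
        have hacc' : acc = (P ++ [x]).filter (fun u => u.2 == b) := by
          simp [List.filter_append, heq, hacc]
        have := ih b acc (P ++ [x]) hacc' hP'
        rw [List.foldl_cons, hstep, this, hext, hb']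
        simp

theorem pvAlt_eq_filter (mini : Bool) (x : String × Int) (t : List (String × Int)) :
    obtain_list_min_alt (x :: t) mini
      = (x :: t).filter (fun u => u.2 == pvExtv mini x.2 t) := by
  unfold obtain_list_min_alt
  rw [List.foldl_cons]
  have hstep : pvStepB mini (none, []) x = (some x.2, [x]) := by simp [pvStepB]
  rw [hstep, pvStepB_inv mini t x.2 [x] [x] (by simp) (by intro u hu; simp at hu; subst hu; cases mini <;> simp)]
  simp

theorem obtain_list_min_spec : Claim_equal_obtain_list_min := by
  intro array mini _ hpre
  unfold Spec_obtain_list_min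
  unfold Pre_obtain_list_min at hpre
  obtain ⟨x, t, rfl⟩ : ∃ x t, array = x :: t := by
    cases array with
    | nil => simp at hpre
    | cons x t => exact ⟨x, t, rfl⟩
  unfold obtain_list_min
  rw [if_pos hpre]
  rw [pvAlt_eq_filter]
  -- the extremal element returned by min?/max? has the running-extremum key value
  cases hm : (if mini then PySem.List.min? (x :: t) (fun u => u.2)
              else PySem.List.max? (x :: t) (fun u => u.2)) with
  | none =>
    exfalso
    cases mini <;> simp only [if_true, if_false, Bool.false_eq_true] at hm
    · exact (List.cons_ne_nil x t) ((PySem.List.max?_eq_none_iff _ _).mp hm)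
    · exact (List.cons_ne_nil x t) ((PySem.List.min?_eq_none_iff _ _).mp hm)
  | some m =>
    dsimp only
    rw [PySem.List.foldl_append_if_eq_filter]
    have hkey : m.2 = pvExtv mini x.2 t := by
      have hE := pvExtv_le mini x.2 t
      have hEmem := pvExtv_mem mini x.2 t
      cases mini <;> simp only [if_true, if_false, Bool.false_eq_true] at hm hE ⊢
      · -- max case
        have hmem := PySem.List.max?_mem hm
        have hmax := PySem.List.max?_isMax hm
        have h1 : m.2 ≤ pvExtv false x.2 t := by
          rcases List.mem_cons.mp hmem with h | h
          · exact h ▸ hE.1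
          · exact hE.2 m h
        have h2 : pvExtv false x.2 t ≤ m.2 := by
          rcases hEmem with h | ⟨u, hu, he⟩
          · rw [h]; exact hmax x (by simp)
          · rw [← he]; exact hmax u (by simp [hu])
        omega
      · have hmem := PySem.List.min?_mem hm
        have hmin := PySem.List.min?_isMin hm
        have h1 : pvExtv true x.2 t ≤ m.2 := by
          rcases List.mem_cons.mp hmem with h | h
          · exact h ▸ hE.1
          · exact hE.2 m h
        have h2 : m.2 ≤ pvExtv true x.2 t := by
          rcases hEmem with h | ⟨u, hu, he⟩
          · rw [h]; exact hmin x (by simp)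
          · rw [← he]; exact hmin u (by simp [hu])
        omega
    rw [hkey]
    simp

-- ===== VERDICT (by name: the statement is the Claim_ definition above) =====
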